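-- pv_equiv track=rewrite | github.com/ameyarawat/password-strength-checker-cli | password_strength_checker.py | detect_character_sets
-- ===== SOURCE A (Python) =====
-- from typing import Dict, List, Tuple
--
-- CHARSETS: Dict[str, str] = {
--     "lower": "abcdefghijklmnopqrstuvwxyz",
--     "upper": "ABCDEFGHIJKLMNOPQRSTUVWXYZ",
--     "digits": "0123456789",
--     # Symbols include common ASCII punctuation; adjust if needed
--     "symbols": r"!\"#$%&'()*+,-./:;<=>?@[\\]^_`{|}~",
--     "space": " ",
-- }
--
-- def detect_character_sets(text: str) -> Tuple[List[str], int]: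
--     present: List[str] = []
--     charset_union = set()
--     for name, chars in CHARSETS.items():
--         if any(ch in chars for ch in text):
--             present.append(name)
--             charset_union.update(chars)
--     return present, len(charset_union)
-- ===== SOURCE B (Python) =====
-- from typing import Dict, List, Tuple
--
-- CHARSETS: Dict[str, str] = {
--     "lower": "abcdefghijklmnopqrstuvwxyz",
--     "upper": "ABCDEFGHIJKLMNOPQRSTUVWXYZ",
--     "digits": "0123456789",
--     "symbols": r"!\"#$%&'()*+,-./:;<=>?@[\\]^_`{|}~",
--     "space": " ",
-- }
--
-- # Reverse index: each character -> the name of the (unique) charset containing it.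
-- CHAR_TO_SET: Dict[str, str] = {ch: name for name, chars in CHARSETS.items() for ch in chars}
--
-- def detect_character_sets(text: str) -> Tuple[List[str], int]:
--     # Single pass over text through the reverse index; no per-charset scans of text.
--     detected = set()
--     for ch in text:
--         name = CHAR_TO_SET.get(ch)
--         if name is not None:
--             detected.add(name)
--     # present follows CHARSETS declaration order; union size is the sum of the
--     # detected charsets' distinct sizes (the charsets are pairwise disjoint).
--     present = [name for name in CHARSETS if name in detected]
--     return present, sum(len(set(CHARSETS[name])) for name in present)
-- ===== Notes on version B (the rewrite author's own statement) =====
-- stated objective: faster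
-- what changed: B precomputes a reverse index char->charset-name once, makes a single pass over text collecting the detected charset names through that index, then lists present names in CHARSETS order and computes the union size as the sum of the detected (pairwise disjoint) charsets' distinct sizes, replacing A's per-charset rescans of text and incremental union-set building.
import Mathlib
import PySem

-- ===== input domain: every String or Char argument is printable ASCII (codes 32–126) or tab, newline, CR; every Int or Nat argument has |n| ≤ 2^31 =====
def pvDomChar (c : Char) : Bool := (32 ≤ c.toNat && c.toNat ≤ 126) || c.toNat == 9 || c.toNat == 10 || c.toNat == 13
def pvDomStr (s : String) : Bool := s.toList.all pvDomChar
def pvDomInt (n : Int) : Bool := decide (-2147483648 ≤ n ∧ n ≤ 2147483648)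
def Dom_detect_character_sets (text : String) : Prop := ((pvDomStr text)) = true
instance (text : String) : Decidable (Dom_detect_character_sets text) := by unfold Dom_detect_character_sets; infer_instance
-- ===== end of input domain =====

-- B replaces A's per-charset rescans of text by one pass over text through a precomputed
-- reverse index char -> charset name; the union size becomes a sum over the detected
-- (pairwise disjoint) charsets.

def CHARSETS : PySem.Dict String String := PySem.Dict.mk
  [("lower", "abcdefghijklmnopqrstuvwxyz"),
   ("upper", "ABCDEFGHIJKLMNOPQRSTUVWXYZ"),
   ("digits", "0123456789"),
   ("symbols", "!\\\"#$%&'()*+,-./:;<=>?@[\\\\]^_`{|}~"),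
   ("space", " ")]

-- ===== PORT A =====
def detect_character_sets (text : String) : List String × Int :=
  let r := CHARSETS.items.foldl
    (fun (st : List String × PySem.Set Char) nc =>
      if text.toList.any (fun ch => nc.2.toList.contains ch) then
        (st.1 ++ [nc.1], PySem.Set.update st.2 nc.2.toList)
      else st)
    ([], PySem.Set.empty)
  (r.1, PySem.Set.len r.2)

-- ===== PORT B =====
-- CHAR_TO_SET = {ch: name for name, chars in CHARSETS.items() for ch in chars}
def CHAR_TO_SET : PySem.Dict Char String :=
  PySem.Dict.ofList (CHARSETS.items.flatMap (fun nc => nc.2.toList.map (fun ch => (ch, nc.1))))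

def detect_character_sets_alt (text : String) : List String × Int :=
  let detected := text.toList.foldl
    (fun (s : PySem.Set String) ch =>
      match CHAR_TO_SET.get? ch with
      | some name => PySem.Set.add s name
      | none => s)
    PySem.Set.empty
  let present := CHARSETS.keys.filter (fun name => PySem.Set.contains detected name)
  -- 'CHARSETS[name]' is ported as getD: every name in 'present' is a key of CHARSETS,
  -- so the default is never used.
  (present, (present.map (fun name =>
      PySem.Set.len (PySem.Set.ofList (CHARSETS.getD name "").toList))).sum)

-- ===== PRECONDITION & SPEC =====
def Spec_detect_character_sets (text : String) (out : List String × Int) : Prop := out = detect_character_sets_alt text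
instance (text : String) (out : List String × Int) : Decidable (Spec_detect_character_sets text out) := by unfold Spec_detect_character_sets; infer_instance

-- ===== CLAIM (what is proved, stated in full; the proofs are below) =====
def Claim_equal_detect_character_sets : Prop := ∀ (text : String), Dom_detect_character_sets text → Spec_detect_character_sets text (detect_character_sets text)

-- ===== LEMMAS AND PROOFS =====

-- a successful dict lookup comes from an entry of the dict
theorem get?_mem_items {κ ν : Type} [BEq κ] [LawfulBEq κ] (d : PySem.Dict κ ν) (c : κ) (v : ν)
    (h : d.get? c = some v) : (c, v) ∈ d.items := by
  unfold PySem.Dict.get? at h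
  cases hf : List.find? (fun p => p.1 == c) d.items with
  | none => rw [hf] at h; simp at h
  | some p =>
    rw [hf] at h
    have hp := List.find?_some hf
    have hm := List.mem_of_find?_eq_some hf
    simp at h hp
    obtain ⟨p1, p2⟩ := p
    simp at hp h
    subst hp h
    exact hm

-- characterisation of the reverse index: looking up ch yields name N iff ch is in N's charset
theorem rev_eq (N : String) (cs : List Char)
    (h1 : cs.all (fun c => CHAR_TO_SET.get? c == some N) = true)
    (h2 : CHAR_TO_SET.items.all (fun p => !(p.2 == N) || cs.contains p.1) = true)
    (c : Char) : (CHAR_TO_SET.get? c == some N) = cs.contains c := by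
  by_cases hc : c ∈ cs
  · have hg := List.all_eq_true.mp h1 c hc
    simpa [hc] using hg
  · have hnc : cs.contains c = false := by simpa using hc
    rw [hnc]
    cases hg : CHAR_TO_SET.get? c with
    | none => simp
    | some m =>
      have hmem := get?_mem_items _ _ _ hg
      have h2' := List.all_eq_true.mp h2 _ hmem
      by_cases hmN : m = N
      · subst hmN
        simp at h2'
        exact absurd h2' hc
      · simp [hmN]

-- membership of a name in the detected set accumulated over the text
theorem fold_contains (l : List Char) (s : PySem.Set String) (N : String) :
    PySem.Set.contains
      (l.foldl (fun (s : PySem.Set String) ch =>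
        match CHAR_TO_SET.get? ch with
        | some name => PySem.Set.add s name
        | none => s) s) N
    = (PySem.Set.contains s N || l.any (fun c => CHAR_TO_SET.get? c == some N)) := by
  induction l generalizing s with
  | nil => simp
  | cons c l ih =>
    simp only [List.foldl_cons, List.any_cons, ih]
    cases hg : CHAR_TO_SET.get? c with
    | none => simp
    | some m =>
      have hadd : PySem.Set.contains (PySem.Set.add s m) N = (PySem.Set.contains s N || (m == N)) := by
        rcases hc : PySem.Set.contains (s.add m) N with _ | _ <;>
          rcases hs : PySem.Set.contains s N with _ | _ <;>
            rcases hm : (m == N) with _ | _ <;>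
              simp_all [PySem.Set.contains, PySem.Set.mem_add]
      simp only [hadd]
      rcases hm : (m == N) with _ | _ <;> simp [hm]

set_option maxRecDepth 200000 in
-- the reverse index, evaluated: each character mapped to the name of its charset
theorem char_to_set_items : CHAR_TO_SET = PySem.Dict.mk
  [('a', "lower"),
   ('b', "lower"),
   ('c', "lower"),
   ('d', "lower"),
   ('e', "lower"),
   ('f', "lower"),
   ('g', "lower"),
   ('h', "lower"),
   ('i', "lower"),
   ('j', "lower"),
   ('k', "lower"),
   ('l', "lower"),
   ('m', "lower"),
   ('n', "lower"),
   ('o', "lower"),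
   ('p', "lower"),
   ('q', "lower"),
   ('r', "lower"),
   ('s', "lower"),
   ('t', "lower"),
   ('u', "lower"),
   ('v', "lower"),
   ('w', "lower"),
   ('x', "lower"),
   ('y', "lower"),
   ('z', "lower"),
   ('A', "upper"),
   ('B', "upper"),
   ('C', "upper"),
   ('D', "upper"),
   ('E', "upper"),
   ('F', "upper"),
   ('G', "upper"),
   ('H', "upper"),
   ('I', "upper"),
   ('J', "upper"),
   ('K', "upper"),
   ('L', "upper"),
   ('M', "upper"),
   ('N', "upper"),
   ('O', "upper"),
   ('P', "upper"),
   ('Q', "upper"),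
   ('R', "upper"),
   ('S', "upper"),
   ('T', "upper"),
   ('U', "upper"),
   ('V', "upper"),
   ('W', "upper"),
   ('X', "upper"),
   ('Y', "upper"),
   ('Z', "upper"),
   ('0', "digits"),
   ('1', "digits"),
   ('2', "digits"),
   ('3', "digits"),
   ('4', "digits"),
   ('5', "digits"),
   ('6', "digits"),
   ('7', "digits"),
   ('8', "digits"),
   ('9', "digits"),
   ('!', "symbols"),
   ('\\', "symbols"),
   ('"', "symbols"),
   ('#', "symbols"),
   ('$', "symbols"),
   ('%', "symbols"),
   ('&', "symbols"),
   ('\'', "symbols"),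
   ('(', "symbols"),
   (')', "symbols"),
   ('*', "symbols"),
   ('+', "symbols"),
   (',', "symbols"),
   ('-', "symbols"),
   ('.', "symbols"),
   ('/', "symbols"),
   (':', "symbols"),
   (';', "symbols"),
   ('<', "symbols"),
   ('=', "symbols"),
   ('>', "symbols"),
   ('?', "symbols"),
   ('@', "symbols"),
   ('[', "symbols"),
   (']', "symbols"),
   ('^', "symbols"),
   ('_', "symbols"),
   ('`', "symbols"),
   ('{', "symbols"),
   ('|', "symbols"),
   ('}', "symbols"),
   ('~', "symbols"),
   (' ', "space")] := by rfl

theorem rev_lower (c : Char) :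
    (CHAR_TO_SET.get? c == some "lower") = ("abcdefghijklmnopqrstuvwxyz" : String).toList.contains c :=
  rev_eq _ _ (by rw [char_to_set_items]; rfl) (by rw [char_to_set_items]; rfl) c

theorem rev_upper (c : Char) :
    (CHAR_TO_SET.get? c == some "upper") = ("ABCDEFGHIJKLMNOPQRSTUVWXYZ" : String).toList.contains c :=
  rev_eq _ _ (by rw [char_to_set_items]; rfl) (by rw [char_to_set_items]; rfl) c

theorem rev_digits (c : Char) :
    (CHAR_TO_SET.get? c == some "digits") = ("0123456789" : String).toList.contains c :=
  rev_eq _ _ (by rw [char_to_set_items]; rfl) (by rw [char_to_set_items]; rfl) c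

theorem rev_symbols (c : Char) :
    (CHAR_TO_SET.get? c == some "symbols") = ("!\\\"#$%&'()*+,-./:;<=>?@[\\\\]^_`{|}~" : String).toList.contains c :=
  rev_eq _ _ (by rw [char_to_set_items]; rfl) (by rw [char_to_set_items]; rfl) c

theorem rev_space (c : Char) :
    (CHAR_TO_SET.get? c == some "space") = (" " : String).toList.contains c :=
  rev_eq _ _ (by rw [char_to_set_items]; rfl) (by rw [char_to_set_items]; rfl) c

set_option maxRecDepth 40000 in
set_option maxHeartbeats 1000000 in
-- ===== VERDICT (by name: the statement is the Claim_ definition above) =====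
theorem detect_character_sets_spec : Claim_equal_detect_character_sets := by
  intro text _
  unfold Spec_detect_character_sets detect_character_sets detect_character_sets_alt
  simp only [CHARSETS, PySem.Dict.keys, List.map_cons, List.map_nil,
    List.foldl_cons, List.foldl_nil, List.filter_cons, List.filter_nil,
    fold_contains,
    funext rev_lower, funext rev_upper, funext rev_digits, funext rev_symbols, funext rev_space]
  simp only [show PySem.Set.contains (PySem.Set.empty : PySem.Set String) = fun _ => false from rfl]
  simp only [Bool.false_or]
  generalize text.toList.any (fun ch => ("abcdefghijklmnopqrstuvwxyz" : String).toList.contains ch) = b1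
  generalize text.toList.any (fun ch => ("ABCDEFGHIJKLMNOPQRSTUVWXYZ" : String).toList.contains ch) = b2
  generalize text.toList.any (fun ch => ("0123456789" : String).toList.contains ch) = b3
  generalize text.toList.any (fun ch => ("!\\\"#$%&'()*+,-./:;<=>?@[\\\\]^_`{|}~" : String).toList.contains ch) = b4
  generalize text.toList.any (fun ch => (" " : String).toList.contains ch) = b5
  revert b1 b2 b3 b4 b5
  decide
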